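-- pv_equiv track=rewrite | github.com/AndrewWant/pyEcoHAB | pyEcoHAB/trajectories.py | single_mouse_antenna_transitions
-- ===== SOURCE A (Python) =====
-- def single_mouse_antenna_transitions(antennas1, times1):
--     out = {}
--     for i, a1 in enumerate(antennas1[:-1]):
--         a2 = antennas1[i+1]
--         key = "%s %s" % (a1, a2)
--         if key not in out:
--             out[key] = []
--         out[key].append(times1[i+1]-times1[i])
--     return out
-- ===== SOURCE B (Python) =====
-- def single_mouse_antenna_transitions(antennas1, times1):
--     # Two-pass regrouping: flatten consecutive transitions into (key, delta) pairs,
--     # list keys in order of first occurrence, then collect each key's deltas by a scan.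
--     pairs = [("%s %s" % (antennas1[i], antennas1[i + 1]), times1[i + 1] - times1[i])
--              for i in range(len(antennas1) - 1)]
--     keys = []
--     for k, _ in pairs:
--         if k not in keys:
--             keys.append(k)
--     return {k: [d for k2, d in pairs if k2 == k] for k in keys}
-- ===== Notes on version B (the rewrite author's own statement) =====
-- stated objective: alternative
-- what changed: Replaces the single-pass dict-grouping over enumerated indices by a two-pass scheme: first flatten consecutive transitions into a (key, delta) pair list, then list keys by first occurrence and collect each key's deltas with a per-key filter pass.
import Mathlib
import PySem

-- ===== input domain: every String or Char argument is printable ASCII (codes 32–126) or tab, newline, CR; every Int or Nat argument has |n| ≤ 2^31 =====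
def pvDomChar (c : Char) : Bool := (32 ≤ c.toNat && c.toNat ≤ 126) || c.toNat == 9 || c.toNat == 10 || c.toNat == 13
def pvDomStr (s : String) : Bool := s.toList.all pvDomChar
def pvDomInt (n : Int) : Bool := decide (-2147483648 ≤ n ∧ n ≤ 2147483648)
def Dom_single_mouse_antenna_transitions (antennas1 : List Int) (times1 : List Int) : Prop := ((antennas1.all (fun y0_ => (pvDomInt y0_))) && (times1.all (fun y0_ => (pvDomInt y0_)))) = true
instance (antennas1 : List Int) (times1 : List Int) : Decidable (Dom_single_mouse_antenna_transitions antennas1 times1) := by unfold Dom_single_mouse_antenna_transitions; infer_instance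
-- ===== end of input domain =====

-- B regroups the transitions in two passes (flat (key,delta) pair list, first-occurrence keys,
-- per-key filter) instead of A's single dict-grouping pass; an alternative decomposition, not faster.


-- ===== PORT A =====
-- A's "if key not in out: out[key] = []" followed by "out[key].append(d)" is exactly
-- out[key] = out.get(key, []) + [d] with Python's in-place/append dict ordering,
-- i.e. PySem.Dict.modify key [] (· ++ [d]).  Indexing uses pyGetD: all indices are in
-- range under Pre_ below (outside Pre_ Python raises IndexError).
def single_mouse_antenna_transitions (antennas1 : List Int) (times1 : List Int) : List (String × List Int) :=
  ((PySem.List.enumerate (PySem.List.slice antennas1 none (some (-1)))).foldl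
    (fun out p =>
      out.modify (PySem.Int.toStr p.2 ++ " " ++ PySem.Int.toStr (PySem.List.pyGetD antennas1 (p.1 + 1) 0)) []
        (fun v => v ++ [PySem.List.pyGetD times1 (p.1 + 1) 0 - PySem.List.pyGetD times1 p.1 0]))
    PySem.Dict.empty).items

-- ===== PORT B =====
-- B's list comprehension over range(len(antennas1)-1) with plain indexing; outside Pre_
-- Python raises IndexError (pyGetD defaults are never reached inside Pre_).
def single_mouse_antenna_transitions_alt (antennas1 : List Int) (times1 : List Int) : List (String × List Int) :=
  let pairs := (PySem.List.pyRange 0 ((antennas1.length : Int) - 1) 1).map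
      (fun i => (PySem.Int.toStr (PySem.List.pyGetD antennas1 i 0) ++ " " ++
                  PySem.Int.toStr (PySem.List.pyGetD antennas1 (i + 1) 0),
                 PySem.List.pyGetD times1 (i + 1) 0 - PySem.List.pyGetD times1 i 0))
  let keys := pairs.foldl (fun ks p => if ks.contains p.1 then ks else ks ++ [p.1]) []
  keys.map (fun k => (k, (pairs.filter (fun p => p.1 == k)).map Prod.snd))

-- ===== PRECONDITION & SPEC =====
-- Pre_ excludes exactly the inputs on which the Python A raises IndexError (times1 shorter
-- than antennas1 while the loop runs); B raises there too.
def Pre_single_mouse_antenna_transitions (antennas1 : List Int) (times1 : List Int) : Prop :=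
  2 ≤ antennas1.length → antennas1.length ≤ times1.length
instance (antennas1 : List Int) (times1 : List Int) : Decidable (Pre_single_mouse_antenna_transitions antennas1 times1) := by unfold Pre_single_mouse_antenna_transitions; infer_instance
def pvWitness_single_mouse_antenna_transitions : List Int × List Int := ([1, 2, 1], [0, 5, 7])

def Spec_single_mouse_antenna_transitions (antennas1 : List Int) (times1 : List Int) (out : List (String × List Int)) : Prop := out = single_mouse_antenna_transitions_alt antennas1 times1
instance (antennas1 : List Int) (times1 : List Int) (out : List (String × List Int)) : Decidable (Spec_single_mouse_antenna_transitions antennas1 times1 out) := by unfold Spec_single_mouse_antenna_transitions; infer_instance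

-- ===== CLAIM (what is proved, stated in full; the proofs are below) =====
def Claim_equal_single_mouse_antenna_transitions : Prop := ∀ (antennas1 : List Int) (times1 : List Int), Dom_single_mouse_antenna_transitions antennas1 times1 → Pre_single_mouse_antenna_transitions antennas1 times1 → Spec_single_mouse_antenna_transitions antennas1 times1 (single_mouse_antenna_transitions antennas1 times1)

-- ===== LEMMAS AND PROOFS =====

-- the flat (key, delta) pair list both sides group
def pvPairsA (antennas1 times1 : List Int) : List (String × Int) :=
  (PySem.List.enumerate (PySem.List.slice antennas1 none (some (-1)))).map
    (fun p => (PySem.Int.toStr p.2 ++ " " ++ PySem.Int.toStr (PySem.List.pyGetD antennas1 (p.1 + 1) 0),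
               PySem.List.pyGetD times1 (p.1 + 1) 0 - PySem.List.pyGetD times1 p.1 0))

def pvPairsB (antennas1 times1 : List Int) : List (String × Int) :=
  (PySem.List.pyRange 0 ((antennas1.length : Int) - 1) 1).map
    (fun i => (PySem.Int.toStr (PySem.List.pyGetD antennas1 i 0) ++ " " ++
                PySem.Int.toStr (PySem.List.pyGetD antennas1 (i + 1) 0),
               PySem.List.pyGetD times1 (i + 1) 0 - PySem.List.pyGetD times1 i 0))

theorem pv_enumerate_getElem? {α : Type} (xs : List α) (s : Int) (k : Nat) :
    (PySem.List.enumerate xs s)[k]? = xs[k]?.map (fun x => (s + (k : Int), x)) := by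
  induction xs generalizing s k with
  | nil => simp [PySem.List.enumerate_nil]
  | cons x t ih =>
    rw [PySem.List.enumerate_cons]
    cases k with
    | zero => simp
    | succ n =>
      simp only [List.getElem?_cons_succ, ih (s + 1) n]
      push_cast
      ring_nf

theorem pv_enumerate_getElem {α : Type} (xs : List α) (s : Int) (k : Nat) (hk : k < xs.length) :
    (PySem.List.enumerate xs s)[k]'(by rw [PySem.List.length_enumerate]; exact hk) = (s + (k : Int), xs[k]) := by
  have h := pv_enumerate_getElem? xs s k
  rw [List.getElem?_eq_getElem (by rw [PySem.List.length_enumerate]; exact hk),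
      List.getElem?_eq_getElem hk] at h
  simpa using h

-- the two pair lists coincide everywhere (both index only positions 0..len-1,
-- and both read the same pyGetD expressions on times1)
theorem pv_pairs_eq (antennas1 times1 : List Int) :
    pvPairsA antennas1 times1 = pvPairsB antennas1 times1 := by
  unfold pvPairsA pvPairsB
  rw [PySem.List.slice_to_neg_one]
  apply List.ext_getElem
  · simp [PySem.List.length_enumerate, PySem.List.length_pyRange_one]
  · intro i h1 h2
    have hlen : i < antennas1.length - 1 := by
      simpa [PySem.List.length_enumerate] using h1
    simp only [List.getElem_map]
    rw [pv_enumerate_getElem antennas1.dropLast 0 i (by simpa using hlen)]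
    rw [PySem.List.getElem_pyRange_one]
    simp only [List.getElem_dropLast]
    have e0 : (0 : Int) + (i : Int) = ((i : Nat) : Int) := by omega
    rw [e0, PySem.List.pyGetD_natCast antennas1 i 0,
        List.getD_eq_getElem _ _ (by omega)]

-- A's dict loop, characterised: first-occurrence key set, per-key filtered deltas
theorem pv_A_eq_group (antennas1 times1 : List Int) :
    single_mouse_antenna_transitions antennas1 times1 =
      (PySem.Set.ofList ((pvPairsA antennas1 times1).map Prod.fst)).map
        (fun k => (k, ((pvPairsA antennas1 times1).filter (fun p => p.1 == k)).map Prod.snd)) := by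
  have hfold : single_mouse_antenna_transitions antennas1 times1 =
      ((pvPairsA antennas1 times1).foldl
        (fun d p => d.modify p.1 [] (fun v => v ++ [p.2])) PySem.Dict.empty).items := by
    unfold single_mouse_antenna_transitions pvPairsA
    rw [List.foldl_map]
  set ps := pvPairsA antennas1 times1 with hps
  set D := ps.foldl (fun d p => d.modify p.1 [] (fun v => v ++ [p.2])) PySem.Dict.empty with hD
  have hnd : D.keys.Nodup := by
    have := PySem.Dict.nodup_keys_foldl_modify_key ps Prod.fst [] (fun _ p v => v ++ [p.2])
      PySem.Dict.empty (by simp)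
    simpa using this
  have hkeys : D.keys = PySem.Set.ofList (ps.map Prod.fst) := by
    have := PySem.Dict.keys_foldl_modify_key ps Prod.fst [] (fun _ p v => v ++ [p.2]) PySem.Dict.empty
    simpa [PySem.Set.ofList, PySem.Set.update] using this
  have hget : ∀ k, D.getD k [] = (ps.filter (fun p => p.1 == k)).map Prod.snd := by
    intro k
    have := PySem.Dict.getD_foldl_modify_append ps PySem.Dict.empty k
    simpa [Prod.snd] using this
  rw [hfold, PySem.Dict.items_eq_map_keys _ hnd [], hkeys]
  exact List.map_congr_left (fun k _ => by rw [hget k])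

-- B, characterised the same way
theorem pv_B_eq_group (antennas1 times1 : List Int) :
    single_mouse_antenna_transitions_alt antennas1 times1 =
      (PySem.Set.ofList ((pvPairsB antennas1 times1).map Prod.fst)).map
        (fun k => (k, ((pvPairsB antennas1 times1).filter (fun p => p.1 == k)).map Prod.snd)) := by
  have hk : (pvPairsB antennas1 times1).foldl (fun ks p => if ks.contains p.1 then ks else ks ++ [p.1]) [] =
      PySem.Set.ofList ((pvPairsB antennas1 times1).map Prod.fst) := by
    unfold PySem.Set.ofList
    rw [List.foldl_map]
    rfl
  unfold single_mouse_antenna_transitions_alt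
  dsimp only
  rw [show (PySem.List.pyRange 0 ((antennas1.length : Int) - 1) 1).map
      (fun i => (PySem.Int.toStr (PySem.List.pyGetD antennas1 i 0) ++ " " ++
                  PySem.Int.toStr (PySem.List.pyGetD antennas1 (i + 1) 0),
                 PySem.List.pyGetD times1 (i + 1) 0 - PySem.List.pyGetD times1 i 0)) = pvPairsB antennas1 times1 from rfl]
  rw [hk]

-- ===== VERDICT (by name: the statement is the Claim_ definition above) =====
theorem single_mouse_antenna_transitions_spec : Claim_equal_single_mouse_antenna_transitions := by
  intro antennas1 times1 _ _
  unfold Spec_single_mouse_antenna_transitions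
  rw [pv_A_eq_group, pv_B_eq_group, pv_pairs_eq antennas1 times1]
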